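-- pv_equiv track=rewrite | github.com/spacesheet/algorithm-for-codingtest | String/BOJ1264.py | sentence_list_vowl_counter
-- ===== SOURCE A (Python) =====
-- def vowel_checker(letter: str) -> bool:
--     vowel_list = ['A', 'I', 'O', 'U', 'E']
--     return letter in vowel_list
--
-- def sentence_list_vowl_counter(input_list: list) -> list:
--     result_list = []
--     for sentence in input_list:
--         result = 0
--         for letter in sentence:
--             if vowel_checker(letter):
--                 result += 1
--         result_list.append(result)
--     return result_list
-- ===== SOURCE B (Python) =====
-- def sentence_list_vowl_counter(input_list: list) -> list:
--     result_list = []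
--     for sentence in input_list:
--         freq = {}
--         for ch in sentence:
--             freq[ch] = freq.get(ch, 0) + 1
--         result_list.append(freq.get('A', 0) + freq.get('E', 0) + freq.get('I', 0)
--                            + freq.get('O', 0) + freq.get('U', 0))
--     return result_list
-- ===== Notes on version B (the rewrite author's own statement) =====
-- stated objective: alternative
-- what changed: B builds a character-frequency dict per sentence in one pass and sums the five vowel entries, replacing A's per-character membership test against a vowel list.
import Mathlib
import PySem

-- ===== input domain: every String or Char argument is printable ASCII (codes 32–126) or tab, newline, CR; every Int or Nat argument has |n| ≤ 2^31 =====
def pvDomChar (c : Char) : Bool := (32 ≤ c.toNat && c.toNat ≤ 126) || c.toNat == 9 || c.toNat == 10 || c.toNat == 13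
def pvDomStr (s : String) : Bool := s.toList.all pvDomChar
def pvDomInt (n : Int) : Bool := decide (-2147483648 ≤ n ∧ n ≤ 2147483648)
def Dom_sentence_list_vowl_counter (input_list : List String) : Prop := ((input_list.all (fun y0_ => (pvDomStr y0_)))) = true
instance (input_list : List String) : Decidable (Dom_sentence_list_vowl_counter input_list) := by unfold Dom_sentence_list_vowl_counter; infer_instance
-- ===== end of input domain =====

-- ===== PORT A =====
def vowel_checker (letter : Char) : Bool :=
  ['A', 'I', 'O', 'U', 'E'].contains letter

def sentence_list_vowl_counter (input_list : List String) : List Int :=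
  input_list.foldl (fun result_list sentence =>
    result_list ++ [sentence.toList.foldl
      (fun result letter => if vowel_checker letter then result + 1 else result) (0 : Int)]) []

-- ===== PORT B =====
-- B: one frequency dict per sentence, then five lookups
def sentence_list_vowl_counter_alt (input_list : List String) : List Int :=
  input_list.foldl (fun result_list sentence =>
    let freq := sentence.toList.foldl (fun d ch => d.insert ch (d.getD ch 0 + 1))
      (PySem.Dict.empty : PySem.Dict Char Int)
    result_list ++ [freq.getD 'A' 0 + freq.getD 'E' 0 + freq.getD 'I' 0
      + freq.getD 'O' 0 + freq.getD 'U' 0]) []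

-- ===== PRECONDITION & SPEC =====
def Spec_sentence_list_vowl_counter (input_list : List String) (out : List Int) : Prop := out = sentence_list_vowl_counter_alt input_list
instance (input_list : List String) (out : List Int) : Decidable (Spec_sentence_list_vowl_counter input_list out) := by unfold Spec_sentence_list_vowl_counter; infer_instance

-- ===== CLAIM (what is proved, stated in full; the proofs are below) =====
def Claim_equal_sentence_list_vowl_counter : Prop := ∀ (input_list : List String), Dom_sentence_list_vowl_counter input_list → Spec_sentence_list_vowl_counter input_list (sentence_list_vowl_counter input_list)

-- ===== LEMMAS AND PROOFS =====

-- ===== VERDICT (by name: the statement is the Claim_ definition above) =====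
lemma vowel_count_split (l : List Char) :
    (l.countP vowel_checker : Int) =
      (l.count 'A' : Int) + l.count 'E' + l.count 'I' + l.count 'O' + l.count 'U' := by
  induction l with
  | nil => simp
  | cons h t ih =>
    simp only [List.countP_cons, List.count_cons]
    by_cases h1 : h = 'A' <;> by_cases h2 : h = 'E' <;> by_cases h3 : h = 'I' <;>
      by_cases h4 : h = 'O' <;> by_cases h5 : h = 'U' <;>
      simp_all [vowel_checker] <;> push_cast <;> omega

theorem sentence_list_vowl_counter_spec : Claim_equal_sentence_list_vowl_counter := by
  intro input_list _
  unfold Spec_sentence_list_vowl_counter sentence_list_vowl_counter sentence_list_vowl_counter_alt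
  rw [PySem.List.foldl_append_singleton_eq_map, PySem.List.foldl_append_singleton_eq_map]
  refine congrArg _ (List.map_congr_left fun s _ => ?_)
  rw [PySem.List.foldl_if_add_one, vowel_count_split]
  simp only [PySem.Dict.getD_foldl_insert_add_one, PySem.Dict.getD_empty]
  ring
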